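-- pv_equiv track=rewrite | github.com/verarong/CommonOcrExtractor | information_extraction.py | _get_decode
-- ===== SOURCE A (Python) =====
-- from itertools import product, groupby
--
-- def _get_decode(decode):
--     siamese_decode = []
--     for code in decode:
--         if "}" in code:
--             sub_code = [i for i in code.split("}") if i]
--             code_list = []
--             for x in sub_code:
--                 if "{" in x:
--                     before, after = [i for i in x.split("{") if i]
--                     if "," in after:
--                         min_, max_ = after.split(",")
--                         code_list.append([before[:-1] + before[-1] * i for i in range(int(min_), int(max_) + 1)])
--                     else:
--                         code_list.append([before[:-1] + before[-1] * int(after)])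
--                 else:
--                     code_list.append([x])
--             for pairs in product(*code_list):
--                 siamese_decode.append("".join(pairs))
--         else:
--             siamese_decode.append(code)
--     return siamese_decode
-- ===== SOURCE B (Python) =====
-- def _expand(code):
--     if "}" not in code:
--         return [code]
--     segs = [s for s in code.split("}") if s]
--     for i, seg in enumerate(segs):
--         if "{" not in seg:
--             continue
--         before, after = [p for p in seg.split("{") if p]
--         if "," in after:
--             lo, hi = after.split(",")
--             opts = [before[:-1] + before[-1] * k for k in range(int(lo), int(hi) + 1)]
--         else:
--             opts = [before[:-1] + before[-1] * int(after)]
--         prefix = "".join(segs[:i])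
--         rest = segs[i + 1:]
--         tail = "}" + "}".join(rest) if rest else ""
--         result = []
--         for opt in opts:
--             result.extend(_expand(prefix + opt + tail))
--         return result
--     return ["".join(segs)]
--
--
-- def _get_decode(decode):
--     siamese_decode = []
--     for code in decode:
--         siamese_decode.extend(_expand(code))
--     return siamese_decode
-- ===== Notes on version B (the rewrite author's own statement) =====
-- stated objective: alternative
-- what changed: Replaces A's parse-all-segments-then-itertools.product scheme by a recursive string-rewriting expander: it locates the first brace group in the code, rewrites the code into one new string per option of that group (earlier segments joined in front, later segments rejoined with '}'), and recurses on each rewritten string until no braces remain; no list of option lists and no Cartesian product is ever materialized.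
import Mathlib
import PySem

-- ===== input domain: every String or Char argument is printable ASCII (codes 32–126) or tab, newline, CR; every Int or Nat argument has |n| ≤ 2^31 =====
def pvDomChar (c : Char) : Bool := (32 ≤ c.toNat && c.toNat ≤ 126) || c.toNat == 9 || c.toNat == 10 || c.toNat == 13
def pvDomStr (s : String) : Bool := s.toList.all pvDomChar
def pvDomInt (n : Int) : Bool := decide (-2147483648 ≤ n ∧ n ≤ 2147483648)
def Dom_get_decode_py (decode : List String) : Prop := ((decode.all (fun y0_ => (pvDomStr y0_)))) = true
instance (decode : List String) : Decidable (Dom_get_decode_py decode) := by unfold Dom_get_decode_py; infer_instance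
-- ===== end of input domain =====

-- B replaces A's parse-all + itertools.product scheme by a recursive string rewriter that
-- expands the first brace group of the code into one new string per option and recurses;
-- objective: alternative (no option-list table and no Cartesian product is materialized).

-- ===== PORT A =====
-- A's inline per-segment parse: the option list A appends to code_list for segment x.
-- On inputs where the Python raises (bad unpack / int()), returns [] — those are outside Pre_.
def pvOptsA (x : List Char) : List (List Char) :=
  if PySem.Chars.isIn ['{'] x then
    match (PySem.Chars.splitOn x ['{']).filter (fun i => decide (i ≠ [])) with
    | [before, after] =>
      if PySem.Chars.isIn [','] after then
        match PySem.Chars.splitOn after [','] with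
        | [min_, max_] =>
          match PySem.Int.ofChars? min_, PySem.Int.ofChars? max_ with
          | some mn, some mx =>
            (PySem.List.pyRange mn (mx + 1) 1).map
              (fun i => PySem.List.slice before none (some (-1)) ++
                        List.replicate i.toNat (PySem.List.pyGetD before (-1) ' '))
          | _, _ => []
        | _ => []
      else
        match PySem.Int.ofChars? after with
        | some n => [PySem.List.slice before none (some (-1)) ++
                     List.replicate n.toNat (PySem.List.pyGetD before (-1) ' ')]
        | none => []
    | _ => []
  else [x]

-- itertools.product over a list of option lists (last factor varies fastest)
def pvProduct (ls : List (List (List Char))) : List (List (List Char)) :=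
  match ls with
  | [] => [[]]
  | l :: rest => l.flatMap (fun v => (pvProduct rest).map (fun p => v :: p))

def get_decode_py (decode : List String) : List String :=
  (decode.foldl (fun siamese_decode code =>
    let cs := code.toList
    if PySem.Chars.isIn ['}'] cs then
      let sub_code := (PySem.Chars.splitOn cs ['}']).filter (fun i => decide (i ≠ []))
      let code_list := sub_code.foldl (fun cl x => cl ++ [pvOptsA x]) []
      (pvProduct code_list).foldl (fun sd pairs => sd ++ [PySem.Chars.join [] pairs]) siamese_decode
    else siamese_decode ++ [cs]) []).map String.ofList

-- ===== PORT B =====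
-- Source B's inline parse of one brace segment ("{" absent → the segment itself);
-- [] where the Python raises (outside Pre_)
def pvOptionsB (seg : List Char) : List (List Char) :=
  if !PySem.Chars.isIn ['{'] seg then [seg]
  else
    match (PySem.Chars.splitOn seg ['{']).filter (fun p => decide (p ≠ [])) with
    | [before, after] =>
      let stem := PySem.List.slice before none (some (-1))
      let last := PySem.List.pyGetD before (-1) ' '
      if PySem.Chars.isIn [','] after then
        match PySem.Chars.splitOn after [','] with
        | [lo, hi] =>
          match PySem.Int.ofChars? lo, PySem.Int.ofChars? hi with
          | some l, some h => (PySem.List.pyRange l (h + 1) 1).map (fun i => stem ++ List.replicate i.toNat last)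
          | _, _ => []
        | _ => []
      else
        match PySem.Int.ofChars? after with
        | some n => [stem ++ List.replicate n.toNat last]
        | none => []
    | _ => []

-- Source B's 'for i, seg in enumerate(segs): if "{" not in seg: continue …' scan:
-- the segments before the first brace segment, that segment, and the rest (none = no brace segment)
def pvFindBrace (segs : List (List Char)) : Option (List (List Char) × List Char × List (List Char)) :=
  match segs with
  | [] => none
  | seg :: rest =>
    if PySem.Chars.isIn ['{'] seg then some ([], seg, rest)
    else
      match pvFindBrace rest with
      | none => none
      | some (pre, s, r) => some (seg :: pre, s, r)

-- Source B's recursive _expand; fuel only makes the recursion structural (the top-level call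
-- passes code.length + 1, which the proof shows is never exhausted)
def pvExpand (fuel : Nat) (code : List Char) : List (List Char) :=
  match fuel with
  | 0 => []
  | fuel + 1 =>
    if PySem.Chars.isIn ['}'] code then
      let segs := (PySem.Chars.splitOn code ['}']).filter (fun s => decide (s ≠ []))
      match pvFindBrace segs with
      | none => [PySem.Chars.join [] segs]
      | some (pre, seg, rest) =>
        let opts := pvOptionsB seg
        let prefx := PySem.Chars.join [] pre
        let tail := if rest ≠ [] then '}' :: PySem.Chars.join ['}'] rest else []
        opts.foldl (fun result opt => result ++ pvExpand fuel (prefx ++ opt ++ tail)) []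
    else [code]

def get_decode_py_alt (decode : List String) : List String :=
  (decode.foldl (fun out code =>
    out ++ pvExpand (code.toList.length + 1) code.toList) []).map String.ofList

-- ===== PRECONDITION & SPEC =====
-- Pre_ excludes exactly the inputs on which the Python A raises (ValueError from the
-- 'before, after' / 'min_, max_' unpacking or from int() on a non-integer string).
def pvSegOK (x : List Char) : Bool :=
  !PySem.Chars.isIn ['{'] x ||
  (match (PySem.Chars.splitOn x ['{']).filter (fun i => decide (i ≠ [])) with
   | [_, after] =>
     if PySem.Chars.isIn [','] after then
       match PySem.Chars.splitOn after [','] with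
       | [mn, mx] => (PySem.Int.ofChars? mn).isSome && (PySem.Int.ofChars? mx).isSome
       | _ => false
     else (PySem.Int.ofChars? after).isSome
   | _ => false)

def Pre_get_decode_py (decode : List String) : Prop :=
  ∀ code ∈ decode, PySem.Chars.isIn ['}'] code.toList = true →
    ∀ x ∈ (PySem.Chars.splitOn code.toList ['}']).filter (fun i => decide (i ≠ [])), pvSegOK x = true
instance (decode : List String) : Decidable (Pre_get_decode_py decode) := by unfold Pre_get_decode_py; infer_instance

def pvWitness_get_decode_py : List String := ["a{2,4}", "xy", "ab{3}c{1,2}"]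

def Spec_get_decode_py (decode : List String) (out : List String) : Prop := out = get_decode_py_alt decode
instance (decode : List String) (out : List String) : Decidable (Spec_get_decode_py decode out) := by unfold Spec_get_decode_py; infer_instance

-- ===== CLAIM (what is proved, stated in full; the proofs are below) =====
def Claim_equal_get_decode_py : Prop := ∀ (decode : List String), Dom_get_decode_py decode → Pre_get_decode_py decode → Spec_get_decode_py decode (get_decode_py decode)

-- ===== LEMMAS AND PROOFS =====

-- simple structural model of code.split(c) (single-character separator)
def pvSplit (c : Char) : List Char → List (List Char)
  | [] => [[]]
  | x :: xs => if x = c then [] :: pvSplit c xs else (pvSplit c xs).modifyHead (x :: ·)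

lemma pvSplit_ne_nil (c : Char) (l : List Char) : pvSplit c l ≠ [] := by
  induction l with
  | nil => simp [pvSplit]
  | cons x xs ih =>
    simp only [pvSplit]
    split_ifs
    · simp
    · cases h : pvSplit c xs with
      | nil => exact absurd h ih
      | cons a t => simp [List.modifyHead]

lemma pvSplit_go (c : Char) : ∀ (fuel : Nat) (l cur acc : _), l.length < fuel →
    PySem.Chars.splitOn.go [c] fuel l cur acc
      = acc.reverse ++ (pvSplit c l).modifyHead (cur.reverse ++ ·) := by
  intro fuel
  induction fuel with
  | zero => intro l cur acc h; omega
  | succ n ih =>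
    intro l cur acc h
    cases l with
    | nil => simp [PySem.Chars.splitOn.go, pvSplit, List.modifyHead]
    | cons x xs =>
      simp only [PySem.Chars.splitOn.go]
      by_cases hx : x = c
      · subst hx
        have : List.isPrefixOf [x] (x :: xs) = true := by simp [List.isPrefixOf]
        rw [if_pos this]
        have hd : List.drop [x].length (x :: xs) = xs := by simp
        rw [hd, ih xs [] (cur.reverse :: acc) (by simpa using Nat.lt_of_succ_lt_succ h)]
        simp only [pvSplit, List.reverse_cons, List.reverse_nil,
          List.nil_append, List.append_assoc, List.cons_append]
        cases hsp : pvSplit x xs <;> simp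
      · have : List.isPrefixOf [c] (x :: xs) = false := by
          simp [List.isPrefixOf]
          exact fun hc => (hx hc.symm).elim
        rw [if_neg (by simp [this])]
        rw [ih xs (x :: cur) acc (by simpa using Nat.lt_of_succ_lt_succ h)]
        simp only [pvSplit, if_neg hx]
        cases hsp : pvSplit c xs with
        | nil => exact absurd hsp (pvSplit_ne_nil c xs)
        | cons a t => simp [List.modifyHead]

lemma splitOn_eq_pvSplit (c : Char) (l : List Char) :
    PySem.Chars.splitOn l [c] = pvSplit c l := by
  have h := pvSplit_go c (l.length + 1) l [] [] (by omega)
  simp only [PySem.Chars.splitOn] at *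
  rw [h]
  cases hsp : pvSplit c l with
  | nil => exact absurd hsp (pvSplit_ne_nil c l)
  | cons a t => simp [List.modifyHead]

lemma pvSplit_of_not_mem (c : Char) (l : List Char) (h : c ∉ l) : pvSplit c l = [l] := by
  induction l with
  | nil => rfl
  | cons x xs ih =>
    simp only [List.mem_cons, not_or] at h
    have hx : ¬ x = c := fun hh => h.1 hh.symm
    simp [pvSplit, hx, ih h.2, List.modifyHead]

lemma pvSplit_append (c : Char) (u v : List Char) (h : c ∉ u) :
    pvSplit c (u ++ v) = (pvSplit c v).modifyHead (u ++ ·) := by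
  induction u with
  | nil =>
    cases hsp : pvSplit c v with
    | nil => exact absurd hsp (pvSplit_ne_nil c v)
    | cons a t => simp [hsp, List.modifyHead]
  | cons x xs ih =>
    simp only [List.mem_cons, not_or] at h
    have hx : ¬ x = c := fun hh => h.1 hh.symm
    simp only [List.cons_append, pvSplit, if_neg hx, ih h.2]
    cases hsp : pvSplit c v with
    | nil => exact absurd hsp (pvSplit_ne_nil c v)
    | cons a t => simp [List.modifyHead]

lemma pvSplit_sep (c : Char) (u v : List Char) (h : c ∉ u) :
    pvSplit c (u ++ c :: v) = u :: pvSplit c v := by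
  rw [pvSplit_append c u _ h]
  simp [pvSplit, List.modifyHead]

-- pieces of pvSplit avoid the separator and are made of chars of l
lemma pvSplit_mem (c : Char) (l : List Char) :
    ∀ p ∈ pvSplit c l, ∀ x ∈ p, x ∈ l ∧ x ≠ c := by
  induction l with
  | nil => intro p hp x hx; simp [pvSplit] at hp; simp [hp] at hx
  | cons y ys ih =>
    intro p hp x hx
    simp only [pvSplit] at hp
    by_cases hy : y = c
    · rw [if_pos hy] at hp
      rcases List.mem_cons.mp hp with hp | hp
      · simp [hp] at hx
      · have := ih p hp x hx
        exact ⟨List.mem_cons_of_mem _ this.1, this.2⟩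
    · rw [if_neg hy] at hp
      cases hsp : pvSplit c ys with
      | nil => exact absurd hsp (pvSplit_ne_nil c ys)
      | cons a t =>
        rw [hsp] at hp
        simp only [List.modifyHead, List.mem_cons] at hp
        rcases hp with hp | hp
        · subst hp
          rcases List.mem_cons.mp hx with hx | hx
          · exact ⟨by simp [hx], by simpa [hx] using hy⟩
          · have := ih a (by simp [hsp]) x hx
            exact ⟨List.mem_cons_of_mem _ this.1, this.2⟩
        · have := ih p (by simp [hsp, hp]) x hx
          exact ⟨List.mem_cons_of_mem _ this.1, this.2⟩

-- rejoining the fragments with the separator: split of the join of sep-free pieces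
lemma pvSplit_join (c : Char) : ∀ (ps : List (List Char)), ps ≠ [] →
    (∀ p ∈ ps, c ∉ p) → pvSplit c (PySem.Chars.join [c] ps) = ps := by
  intro ps
  induction ps with
  | nil => intro h; exact absurd rfl h
  | cons p t ih =>
    intro _ hfree
    cases t with
    | nil =>
      have : PySem.Chars.join [c] [p] = p := by
        simp [PySem.Chars.join, List.intercalate, List.intersperse]
      rw [this, pvSplit_of_not_mem c p (hfree p (by simp))]
    | cons q t' =>
      rw [PySem.Chars.join_cons_cons]
      have : p ++ [c] ++ PySem.Chars.join [c] (q :: t') = p ++ c :: PySem.Chars.join [c] (q :: t') := by simp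
      rw [this, pvSplit_sep c _ _ (hfree p (by simp))]
      rw [ih (by simp) (fun x hx => hfree x (by simp [hx]))]

-- counting a character across the pieces
lemma pvSplit_count (c a : Char) (hac : a ≠ c) (l : List Char) :
    ((pvSplit c l).map (List.count a)).sum = l.count a := by
  induction l with
  | nil => simp [pvSplit]
  | cons x xs ih =>
    simp only [pvSplit]
    by_cases hx : x = c
    · subst hx
      have hxa : ¬ x = a := fun hh => hac hh.symm
      simp [hxa, ih]
    · rw [if_neg hx]
      cases hsp : pvSplit c xs with
      | nil => exact absurd hsp (pvSplit_ne_nil c xs)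
      | cons h t =>
        rw [hsp] at ih
        simp only [List.modifyHead, List.map_cons, List.sum_cons, List.count_cons] at ih ⊢
        omega

lemma filter_map_sum_count (a : Char) (ps : List (List Char)) :
    ((ps.filter (fun s => decide (s ≠ []))).map (List.count a)).sum
      = (ps.map (List.count a)).sum := by
  induction ps with
  | nil => rfl
  | cons p t ih =>
    by_cases hp : p = []
    · subst hp; simpa using ih
    · simp only [List.filter_cons, decide_not, hp, decide_false, Bool.not_false, if_true]
      simp only [List.map_cons, List.sum_cons]
      have : (List.filter (fun s => !decide (s = [])) t) = List.filter (fun s => decide (s ≠ [])) t := by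
        simp [ne_eq]
      rw [this, ih]

-- '"".join' is flatten
lemma joinNil : ∀ (ls : List (List Char)), PySem.Chars.join [] ls = ls.flatten := by
  intro ls
  induction ls with
  | nil => rfl
  | cons l t ih =>
    cases t with
    | nil => simp [PySem.Chars.join, List.intercalate, List.intersperse]
    | cons m t' =>
      simp only [PySem.Chars.join, List.intercalate, List.intersperse] at ih ⊢
      simp [ih]

lemma isIn_singleton (c : Char) (l : List Char) :
    PySem.Chars.isIn [c] l = true ↔ c ∈ l := by
  rw [PySem.Chars.isIn_iff_infix]
  constructor
  · intro h; exact h.subset (by simp)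
  · intro h
    obtain ⟨s, t, rfl⟩ := List.append_of_mem h
    exact ⟨s, t, by simp⟩

-- the two parse helpers agree
lemma pvOpts_eq (x : List Char) : pvOptionsB x = pvOptsA x := by
  unfold pvOptionsB pvOptsA
  by_cases h : PySem.Chars.isIn ['{'] x <;> simp [h]

-- join-of-product of the option lists of a segment list ("A's value for one code block")
def pvPJ (segs : List (List Char)) : List (List Char) :=
  (pvProduct (segs.map pvOptsA)).map List.flatten

lemma pvPJ_nil : pvPJ [] = [[]] := rfl

lemma pvPJ_cons (s : List Char) (t : List (List Char)) :
    pvPJ (s :: t) = (pvOptsA s).flatMap (fun v => (pvPJ t).map (v ++ ·)) := by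
  simp only [pvPJ, pvProduct, List.map_cons, List.map_flatMap, List.map_map]
  congr 1

lemma pvPJ_cons_free (s : List Char) (t : List (List Char)) (h : PySem.Chars.isIn ['{'] s = false) :
    pvPJ (s :: t) = (pvPJ t).map (s ++ ·) := by
  rw [pvPJ_cons]
  simp [pvOptsA, h]

lemma pvPJ_prefix (pre : List (List Char)) (t : List (List Char))
    (h : ∀ p ∈ pre, PySem.Chars.isIn ['{'] p = false) :
    pvPJ (pre ++ t) = (pvPJ t).map (pre.flatten ++ ·) := by
  induction pre with
  | nil => simp
  | cons p ps ih =>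
    rw [List.cons_append, pvPJ_cons_free p _ (h p (by simp)), ih (fun q hq => h q (by simp [hq]))]
    simp [List.map_map, Function.comp, List.append_assoc]

lemma pvPJ_all_free (segs : List (List Char))
    (h : ∀ p ∈ segs, PySem.Chars.isIn ['{'] p = false) :
    pvPJ segs = [segs.flatten] := by
  have := pvPJ_prefix segs [] h
  simpa [pvPJ_nil] using this

-- characterization of the scan for the first brace segment
lemma pvFindBrace_none (segs : List (List Char)) (h : pvFindBrace segs = none) :
    ∀ s ∈ segs, PySem.Chars.isIn ['{'] s = false := by
  induction segs with
  | nil => simp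
  | cons seg rest ih =>
    intro s hs
    simp only [pvFindBrace] at h
    by_cases hb : PySem.Chars.isIn ['{'] seg
    · simp [hb] at h
    · rw [if_neg (by simpa using hb)] at h
      rcases List.mem_cons.mp hs with hs | hs
      · subst hs; simpa using hb
      · cases hf : pvFindBrace rest with
        | none => exact ih hf s hs
        | some v => rw [hf] at h; cases v with | mk a b => cases b with | mk x y => simp at h

lemma pvFindBrace_some (segs : List (List Char)) (pre : List (List Char)) (seg : List Char)
    (rest : List (List Char)) (h : pvFindBrace segs = some (pre, seg, rest)) :
    segs = pre ++ seg :: rest ∧ (∀ p ∈ pre, PySem.Chars.isIn ['{'] p = false) ∧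
      PySem.Chars.isIn ['{'] seg = true := by
  induction segs generalizing pre with
  | nil => simp [pvFindBrace] at h
  | cons s t ih =>
    simp only [pvFindBrace] at h
    by_cases hb : PySem.Chars.isIn ['{'] s
    · rw [if_pos hb] at h
      obtain ⟨rfl, rfl, rfl⟩ : pre = [] ∧ seg = s ∧ rest = t := by
        simpa [eq_comm] using h
      exact ⟨by simp, by simp, hb⟩
    · rw [if_neg (by simpa using hb)] at h
      cases hf : pvFindBrace t with
      | none => rw [hf] at h; simp at h
      | some v =>
        rw [hf] at h
        obtain ⟨p', s', r'⟩ := v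
        obtain ⟨rfl, rfl, rfl⟩ : pre = s :: p' ∧ seg = s' ∧ rest = r' := by
          simpa [eq_comm] using h
        obtain ⟨h1, h2, h3⟩ := ih p' hf
        exact ⟨by simp [h1], by
          intro p hp
          rcases List.mem_cons.mp hp with hp | hp
          · subst hp; simpa using hb
          · exact h2 p hp, h3⟩

-- characters of any option produced for a segment lie in the segment and are not '{'
lemma pvOptionsB_chars (seg : List Char) (o : List Char) (ho : o ∈ pvOptionsB seg) :
    ∀ x ∈ o, x ∈ seg ∧ x ≠ '{' := by
  intro x hx
  unfold pvOptionsB at ho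
  by_cases hb : PySem.Chars.isIn ['{'] seg
  · rw [if_neg (by simpa using hb)] at ho
    rw [splitOn_eq_pvSplit] at ho
    cases hfl : (pvSplit '{' seg).filter (fun p => decide (p ≠ [])) with
    | nil => rw [hfl] at ho; simp at ho
    | cons before t1 =>
      cases t1 with
      | nil => rw [hfl] at ho; simp at ho
      | cons after t2 =>
        cases t2 with
        | cons _ _ => rw [hfl] at ho; simp at ho
        | nil =>
          rw [hfl] at ho
          have hbefore : before ∈ pvSplit '{' seg := by
            have : before ∈ (pvSplit '{' seg).filter (fun p => decide (p ≠ [])) := by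
              rw [hfl]; simp
            exact List.mem_of_mem_filter this
          have hbne : before ≠ [] := by
            have : before ∈ (pvSplit '{' seg).filter (fun p => decide (p ≠ [])) := by
              rw [hfl]; simp
            simpa using List.of_mem_filter this
          have hchar : ∀ y ∈ before, y ∈ seg ∧ y ≠ '{' := pvSplit_mem '{' seg before hbefore
          -- x comes either from the slice of before or the replicated last char of before
          have hxin : x ∈ before := by
            simp only at ho
            by_cases hc : PySem.Chars.isIn [','] after
            · rw [if_pos hc] at ho
              cases hsp : PySem.Chars.splitOn after [','] with
              | nil => rw [hsp] at ho; simp at ho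
              | cons lo t =>
                cases t with
                | nil => rw [hsp] at ho; simp at ho
                | cons hi t' =>
                  cases t' with
                  | cons _ _ => rw [hsp] at ho; simp at ho
                  | nil =>
                    rw [hsp] at ho
                    cases hlo : PySem.Int.ofChars? lo with
                    | none => simp only [hlo] at ho; simp at ho
                    | some lv =>
                      cases hhi : PySem.Int.ofChars? hi with
                      | none => simp only [hlo, hhi] at ho; simp at ho
                      | some hv =>
                        simp only [hlo, hhi] at ho
                        simp only [List.mem_map] at ho
                        obtain ⟨i, _, rfl⟩ := ho
                        rcases List.mem_append.mp hx with hx | hx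
                        · exact PySem.List.mem_of_mem_slice before _ _ hx
                        · have := List.eq_of_mem_replicate hx
                          subst this
                          rw [PySem.List.pyGetD_neg_one before ' ' hbne]
                          exact List.getLast_mem hbne
            · rw [if_neg hc] at ho
              cases hn : PySem.Int.ofChars? after with
              | none => rw [hn] at ho; simp at ho
              | some nv =>
                rw [hn] at ho
                simp only [List.mem_singleton] at ho
                subst ho
                rcases List.mem_append.mp hx with hx | hx
                · exact PySem.List.mem_of_mem_slice before _ _ hx
                · have := List.eq_of_mem_replicate hx
                  subst this
                  rw [PySem.List.pyGetD_neg_one before ' ' hbne]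
                  exact List.getLast_mem hbne
          exact hchar x hxin
  · rw [if_pos (by simpa using hb)] at ho
    simp only [List.mem_singleton] at ho
    have hxs : x ∈ seg := ho ▸ hx
    exact ⟨hxs, fun hxc => hb ((isIn_singleton '{' seg).mpr (hxc ▸ hxs))⟩

-- segments of a '}'-split contain no '}'
lemma seg_no_brace (code : List Char) (s : List Char)
    (hs : s ∈ (PySem.Chars.splitOn code ['}']).filter (fun i => decide (i ≠ []))) :
    '}' ∉ s := by
  intro hmem
  have := pvSplit_mem '}' code s (by
    rw [splitOn_eq_pvSplit] at hs
    exact List.mem_of_mem_filter hs) '}' hmem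
  exact this.2 rfl

-- flatMap congruence on members
lemma flatMap_congr_mem {α β : Type} (l : List α) (f g : α → List β)
    (h : ∀ x ∈ l, f x = g x) : l.flatMap f = l.flatMap g := by
  induction l with
  | nil => rfl
  | cons a t ih =>
    simp only [List.flatMap_cons]
    rw [h a (by simp), ih (fun x hx => h x (by simp [hx]))]

-- three bookkeeping facts about the filtered segments of a code
lemma segs_facts (code : List Char) :
    ∀ s ∈ (PySem.Chars.splitOn code ['}']).filter (fun i => decide (i ≠ [])),
      s ≠ [] ∧ '}' ∉ s ∧ ∀ x ∈ s, x ∈ code := by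
  intro s hs
  refine ⟨by simpa using List.of_mem_filter hs, seg_no_brace code s hs, ?_⟩
  intro x hx
  have := pvSplit_mem '}' code s (by
    rw [splitOn_eq_pvSplit] at hs
    exact List.mem_of_mem_filter hs) x hx
  exact this.1

lemma isIn_eq_false_of_not_mem (c : Char) (l : List Char) (h : c ∉ l) :
    PySem.Chars.isIn [c] l = false := by
  rw [← Bool.not_eq_true, isIn_singleton]
  exact h

-- THE MAIN LEMMA: the rewriting expander computes A's product-join for one code
lemma pvExpand_eq : ∀ (fuel : Nat) (code : List Char), code.count '{' < fuel →
    pvExpand fuel code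
      = (if PySem.Chars.isIn ['}'] code then
          pvPJ ((PySem.Chars.splitOn code ['}']).filter (fun i => decide (i ≠ [])))
        else [code]) := by
  intro fuel
  induction fuel with
  | zero => intro code h; omega
  | succ n ih =>
    intro code hcount
    by_cases hcb : PySem.Chars.isIn ['}'] code
    · simp only [pvExpand, if_pos hcb]
      have hsegfacts := segs_facts code
      cases hfb : pvFindBrace ((PySem.Chars.splitOn code ['}']).filter (fun s => decide (s ≠ []))) with
      | none =>
        have hfree := pvFindBrace_none _ hfb
        rw [pvPJ_all_free _ hfree, joinNil]
      | some t =>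
        obtain ⟨pre, seg, rest⟩ := t
        obtain ⟨hsegs, hprefree, hsegbrace⟩ := pvFindBrace_some _ pre seg rest hfb
        -- character facts
        have hpre_mem : ∀ p ∈ pre, p ∈ (PySem.Chars.splitOn code ['}']).filter (fun i => decide (i ≠ [])) := by
          intro p hp; rw [hsegs]; exact List.mem_append_left _ hp
        have hseg_mem : seg ∈ (PySem.Chars.splitOn code ['}']).filter (fun i => decide (i ≠ [])) := by
          rw [hsegs]; exact List.mem_append_right _ (by simp)
        have hrest_mem : ∀ r ∈ rest, r ∈ (PySem.Chars.splitOn code ['}']).filter (fun i => decide (i ≠ [])) := by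
          intro r hr; rw [hsegs]; exact List.mem_append_right _ (by simp [hr])
        have hflat_nc : '{' ∉ List.flatten pre ∧ '}' ∉ List.flatten pre := by
          constructor
          · intro hmem
            obtain ⟨p, hp, hxp⟩ := List.mem_flatten.mp hmem
            have hmm := (isIn_singleton '{' p).mpr hxp
            rw [hprefree p hp] at hmm
            exact Bool.false_ne_true hmm
          · intro hmem
            obtain ⟨p, hp, hxp⟩ := List.mem_flatten.mp hmem
            exact (hsegfacts p (hpre_mem p hp)).2.1 hxp
        have hjoin_pre : PySem.Chars.join [] pre = List.flatten pre := joinNil pre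
        -- the brace character sits in the code at least once via seg
        have hbrace_in_code : '{' ∈ code := by
          have hxseg : '{' ∈ seg := (isIn_singleton '{' seg).mp hsegbrace
          exact (hsegfacts seg hseg_mem).2.2 '{' hxseg
        have hn_pos : 0 < n := by
          have : 1 ≤ code.count '{' := List.count_pos_iff.mpr hbrace_in_code
          omega
        -- count bookkeeping: total '{' count of code splits over the segments
        have hcount_code : ((((PySem.Chars.splitOn code ['}']).filter
              (fun i => decide (i ≠ []))).map (List.count '{')).sum) = code.count '{' := by
          rw [splitOn_eq_pvSplit, filter_map_sum_count, pvSplit_count '}' '{' (by decide)]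
        -- RHS: peel the brace-free prefix and the brace segment
        simp only []
        rw [hsegs, pvPJ_prefix pre _ hprefree, pvPJ_cons]
        rw [PySem.List.foldl_append_eq_flatMap, List.nil_append, List.map_flatMap]
        rw [pvOpts_eq]  -- make both sides flatMap over pvOptionsB seg
        apply flatMap_congr_mem
        intro o ho
        have hochars := pvOptionsB_chars seg o (by rw [pvOpts_eq]; exact ho)
        have ho_nob : '{' ∉ o := fun hmem => (hochars '{' hmem).2 rfl
        have ho_noc : '}' ∉ o := fun hmem =>
          (hsegfacts seg hseg_mem).2.1 ((hochars '}' hmem).1)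
        have hu_nob : '{' ∉ PySem.Chars.join [] pre ++ o := by
          rw [hjoin_pre]; simp [hflat_nc.1, ho_nob]
        have hu_noc : '}' ∉ PySem.Chars.join [] pre ++ o := by
          rw [hjoin_pre]; simp [hflat_nc.2, ho_noc]
        cases hrest : rest with
        | nil =>
          simp only [ne_eq, not_true_eq_false, reduceIte]
          rw [List.append_nil]
          rw [ih (PySem.Chars.join [] pre ++ o) (by
            rw [List.count_eq_zero.mpr hu_nob]; omega)]
          rw [if_neg (by simp [isIn_eq_false_of_not_mem _ _ hu_noc])]
          simp [pvPJ_nil, hjoin_pre]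
        | cons r rs =>
          have hrestne : rest ≠ [] := by rw [hrest]; simp
          rw [← hrest]
          simp only [ne_eq, hrestne, not_false_iff, reduceIte]
          have hvsplit : pvSplit '}' (PySem.Chars.join ['}'] rest) = rest :=
            pvSplit_join '}' rest hrestne (fun p hp => (hsegfacts p (hrest_mem p hp)).2.1)
          have hvcount : (PySem.Chars.join ['}'] rest).count '{'
              = ((rest.map (List.count '{')).sum) := by
            rw [← pvSplit_count '}' '{' (by decide) (PySem.Chars.join ['}'] rest), hvsplit]
          have hnewcount : (PySem.Chars.join [] pre ++ o ++ '}' :: PySem.Chars.join ['}'] rest).count '{' < n := by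
            have h1 : (PySem.Chars.join [] pre ++ o ++ '}' :: PySem.Chars.join ['}'] rest).count '{'
                = (PySem.Chars.join ['}'] rest).count '{' := by
              rw [List.count_append, List.count_append, List.count_cons]
              rw [List.count_eq_zero.mpr (by rw [hjoin_pre]; exact hflat_nc.1),
                  List.count_eq_zero.mpr ho_nob]
              simp
            have h2 : code.count '{' = ((pre.map (List.count '{')).sum) + seg.count '{'
                + ((rest.map (List.count '{')).sum) := by
              rw [← hcount_code, hsegs]
              simp [List.sum_append]
              omega
            have h3 : 1 ≤ seg.count '{' :=
              List.count_pos_iff.mpr ((isIn_singleton '{' seg).mp hsegbrace)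
            have h4 : (0:Nat) ≤ (pre.map (List.count '{')).sum := Nat.zero_le _
            rw [h1, hvcount]
            omega
          rw [ih _ hnewcount]
          have hin : PySem.Chars.isIn ['}'] (PySem.Chars.join [] pre ++ o ++ '}' :: PySem.Chars.join ['}'] rest) = true := by
            rw [isIn_singleton]; simp
          rw [if_pos hin]
          have hsplitnew : (PySem.Chars.splitOn (PySem.Chars.join [] pre ++ o ++ '}' :: PySem.Chars.join ['}'] rest) ['}']).filter (fun i => decide (i ≠ []))
              = ((PySem.Chars.join [] pre ++ o) :: rest).filter (fun i => decide (i ≠ [])) := by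
            rw [splitOn_eq_pvSplit]
            have : PySem.Chars.join [] pre ++ o ++ '}' :: PySem.Chars.join ['}'] rest
                = (PySem.Chars.join [] pre ++ o) ++ '}' :: PySem.Chars.join ['}'] rest := by
              simp [List.append_assoc]
            rw [this, pvSplit_sep '}' _ _ hu_noc, hvsplit]
          rw [hsplitnew]
          have hrest_filter : rest.filter (fun i => decide (i ≠ [])) = rest :=
            List.filter_eq_self.mpr (fun r hr => by
              simpa using (hsegfacts r (hrest_mem r hr)).1)
          by_cases hu : PySem.Chars.join [] pre ++ o = []
          · rw [List.filter_cons_of_neg (by simp [hu]), hrest_filter]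
            have hpre0 : List.flatten pre = [] := by
              rw [hjoin_pre] at hu
              exact List.append_eq_nil_iff.mp hu |>.1
            have ho0 : o = [] := List.append_eq_nil_iff.mp (by rwa [hjoin_pre] at hu) |>.2
            simp [hpre0, ho0]
          · rw [List.filter_cons_of_pos (by simp only [ne_eq, decide_eq_true_eq]; exact hu), hrest_filter]
            rw [pvPJ_cons_free _ _ (isIn_eq_false_of_not_mem _ _ hu_nob)]
            rw [List.map_map]
            apply List.map_congr_left
            intro t _
            simp [hjoin_pre, List.append_assoc]
    · simp [pvExpand, hcb]

-- A's fold body for one code, in closed form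
lemma bodyA_eq (siamese : List (List Char)) (cs : List Char) :
    (if PySem.Chars.isIn ['}'] cs then
      let sub_code := (PySem.Chars.splitOn cs ['}']).filter (fun i => decide (i ≠ []))
      let code_list := sub_code.foldl (fun cl x => cl ++ [pvOptsA x]) []
      (pvProduct code_list).foldl (fun sd pairs => sd ++ [PySem.Chars.join [] pairs]) siamese
    else siamese ++ [cs])
    = siamese ++ (if PySem.Chars.isIn ['}'] cs then
        pvPJ ((PySem.Chars.splitOn cs ['}']).filter (fun i => decide (i ≠ []))) else [cs]) := by
  by_cases h : PySem.Chars.isIn ['}'] cs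
  · simp only [h, if_pos]
    rw [PySem.List.foldl_append_singleton_eq_map, PySem.List.foldl_append_singleton_eq_map]
    simp only [List.nil_append, pvPJ]
    congr 1
    apply List.map_congr_left
    intro p _
    exact joinNil p
  · simp [h]

-- ===== VERDICT (by name: the statement is the Claim_ definition above) =====
theorem get_decode_py_spec : Claim_equal_get_decode_py := by
  intro decode _ _
  unfold Spec_get_decode_py get_decode_py get_decode_py_alt
  congr 1
  apply PySem.List.foldl_congr_mem
  intro acc code _
  rw [bodyA_eq, pvExpand_eq (code.toList.length + 1) code.toList
    (by have := List.count_le_length (a := '{') (l := code.toList); omega)]
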